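-- pv_equiv track=rewrite | github.com/Nikolas2001-13/Materias | Grafos y conjuntos/amazon.py | dfs
-- ===== SOURCE A (Python) =====
-- def dfs(vis,edge):
--     cola=[0]
--     while cola!=[]:
--         u=cola.pop(0)
--         if vis[u]==None:
--             vis[u]=True
--             for i in edge[u]:
--                 cola.append(i)
--     return vis
-- ===== SOURCE B (Python) =====
-- def dfs(vis, edge):
--     # Level-synchronous traversal: sweep a whole frontier list per round and
--     # build the next frontier, instead of popping single nodes from the front
--     # of one FIFO queue.  Marks the same cells of vis, in the same order, and
--     # returns the same (mutated) vis.
--     frontier = [0]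
--     while frontier:
--         nxt = []
--         for u in frontier:
--             if vis[u] == None:
--                 vis[u] = True
--                 nxt += edge[u]
--         frontier = nxt
--     return vis
-- ===== Notes on version B (the rewrite author's own statement) =====
-- stated objective: alternative
-- what changed: Replaced the single FIFO queue driven by list.pop(0) with a level-synchronous traversal that sweeps a whole frontier list per round and builds the next frontier from it.
-- outside the precondition, e.g. on dfs([None, None], [[0], [99]]): A returns [True, None], B returns [True, None]; on dfs([None], [[0], [5]]): A returns [True], B returns [True]
import Mathlib
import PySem

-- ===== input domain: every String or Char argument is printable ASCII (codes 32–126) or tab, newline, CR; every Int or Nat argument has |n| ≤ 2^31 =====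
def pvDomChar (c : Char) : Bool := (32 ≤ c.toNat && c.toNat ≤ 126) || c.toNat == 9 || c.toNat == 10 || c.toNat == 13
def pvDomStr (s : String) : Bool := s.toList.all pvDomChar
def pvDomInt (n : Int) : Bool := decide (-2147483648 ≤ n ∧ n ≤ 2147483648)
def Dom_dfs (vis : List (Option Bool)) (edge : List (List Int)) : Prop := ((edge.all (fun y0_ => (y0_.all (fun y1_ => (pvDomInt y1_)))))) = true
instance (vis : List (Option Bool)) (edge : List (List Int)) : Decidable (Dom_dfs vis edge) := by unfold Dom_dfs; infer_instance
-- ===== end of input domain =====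

-- B replaces A's FIFO queue (list.pop(0)) by level-synchronous frontier sweeps; same marks
-- on vis, same return value (both Pythons mutate vis in place identically).

-- Termination helpers (cited by the ports' decreasing_by; proofs of the cited lemmas are below the claim block is NOT allowed for these, so they are proved here).
theorem pv_count_set_lt : ∀ (s : List (Option Bool)) (j : Nat), s[j]? = some none →
    (s.set j (some true)).count none < s.count none := by
  intro s
  induction s with
  | nil => intro j h; simp at h
  | cons x t ih =>
    intro j h
    cases j with
    | zero =>
      simp at h
      subst h
      simp [List.count_cons]
    | succ j =>
      simp at h
      have := ih j h
      simp only [List.set_cons_succ, List.count_cons]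
      omega

theorem pv_pyIdx?_get {s : List (Option Bool)} {u : Int} {x : Option Bool}
    (h : PySem.List.pyGet? s u = some x) :
    ∃ j, PySem.List.pyIdx? s.length u = some j ∧ s[j]? = some x := by
  unfold PySem.List.pyGet? at h
  cases hj : PySem.List.pyIdx? s.length u with
  | none => rw [hj] at h; simp at h
  | some j => rw [hj] at h; exact ⟨j, rfl, by simpa using h⟩

theorem pv_cNone_pySetD_lt (s : List (Option Bool)) (u : Int)
    (h : PySem.List.pyGet? s u = some none) :
    (PySem.List.pySetD s u (some true)).count none < s.count none := by
  obtain ⟨j, hj, hget⟩ := pv_pyIdx?_get h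
  have : PySem.List.pySetD s u (some true) = s.set j (some true) := by
    unfold PySem.List.pySetD PySem.List.pySet?
    rw [hj]; rfl
  rw [this]
  exact pv_count_set_lt s j hget

-- ===== PORT A =====
-- Python A: cola=[0]; while cola!=[]: u=cola.pop(0); if vis[u]==None: vis[u]=True; cola += edge[u]
-- On an out-of-range index Python raises IndexError; the port returns the current vis there
-- (those inputs are outside Pre_dfs).
def bfsLoop (edge : List (List Int)) (vis : List (Option Bool)) (cola : List Int) :
    List (Option Bool) :=
  match cola with
  | [] => vis
  | u :: rest =>
    match h : PySem.List.pyGet? vis u with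
    | some none =>
      match PySem.List.pyGet? edge u with
      | some row => bfsLoop edge (PySem.List.pySetD vis u (some true)) (rest ++ row)
      | none => PySem.List.pySetD vis u (some true)   -- IndexError on edge[u] (vis already mutated)
    | some _ => bfsLoop edge vis rest
    | none => vis                                     -- IndexError on vis[u]
termination_by (vis.count none, cola.length)
decreasing_by
  · exact Prod.Lex.left _ _ (pv_cNone_pySetD_lt vis u h)
  · exact Prod.Lex.right _ (by simp)

def dfs (vis : List (Option Bool)) (edge : List (List Int)) : List (Option Bool) :=
  bfsLoop edge vis [0]

-- ===== PORT B =====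
-- Python B: one round body: for u in frontier: if vis[u]==None: vis[u]=True; nxt += edge[u]
def lvlStep (edge : List (List Int)) (p : List (Option Bool) × List Int) (u : Int) :
    List (Option Bool) × List Int :=
  match PySem.List.pyGet? p.1 u with
  | some none =>
    match PySem.List.pyGet? edge u with
    | some row => (PySem.List.pySetD p.1 u (some true), p.2 ++ row)
    | none => p   -- IndexError in Python; outside Pre_dfs
  | _ => p        -- already visited (or IndexError on vis[u], outside Pre_dfs)

-- cited by lvlLoop's decreasing_by
theorem pv_lvlStep_progress (edge : List (List Int)) :
    ∀ (f : List Int) (p : List (Option Bool) × List Int),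
      (f.foldl (lvlStep edge) p).1.count none < p.1.count none ∨ f.foldl (lvlStep edge) p = p := by
  intro f
  induction f with
  | nil => intro p; right; rfl
  | cons u f ih =>
    intro p
    have hstep : (lvlStep edge p u).1.count none < p.1.count none ∨ lvlStep edge p u = p := by
      unfold lvlStep
      cases h : PySem.List.pyGet? p.1 u with
      | none => right; rfl
      | some x =>
        cases x with
        | none =>
          cases PySem.List.pyGet? edge u with
          | none => right; rfl
          | some row => left; exact pv_cNone_pySetD_lt p.1 u h
        | some b => right; rfl
    simp only [List.foldl_cons]
    rcases ih (lvlStep edge p u) with h1 | h1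
    · rcases hstep with h2 | h2
      · left; omega
      · rw [h2] at h1 ⊢; left; exact h1
    · rw [h1]
      rcases hstep with h2 | h2
      · left; exact h2
      · right; exact h2

-- one round of B's while-loop body: fold the for-loop over the frontier, state (vis, nxt)
def lvlRound (edge : List (List Int)) (vis : List (Option Bool)) (frontier : List Int) :
    List (Option Bool) × List Int :=
  frontier.foldl (lvlStep edge) (vis, ([] : List Int))

def lvlLoop (edge : List (List Int)) (vis : List (Option Bool)) (frontier : List Int) :
    List (Option Bool) :=
  match frontier with
  | [] => vis
  | u :: rest =>
    lvlLoop edge (lvlRound edge vis (u :: rest)).1 (lvlRound edge vis (u :: rest)).2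
termination_by (vis.count none, frontier.length)
decreasing_by
  all_goals
    rcases pv_lvlStep_progress edge (u :: rest) (vis, ([] : List Int)) with h | h
  · exact Prod.Lex.left _ _ h
  · rw [lvlRound, h]; exact Prod.Lex.right _ (by simp)

def dfs_alt (vis : List (Option Bool)) (edge : List (List Int)) : List (Option Bool) :=
  lvlLoop edge vis [0]

-- ===== PRECONDITION & SPEC =====
-- Pre_dfs: vis nonempty, and if node 0 is unvisited, the graph must be well-formed (one
-- adjacency row per node, every neighbour a valid Python index, negatives included).  This
-- excludes some inputs on which A still returns — ill-formed graphs whose bad rows happen to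
-- be unreachable from 0 — because exactly which rows are reached can only be determined by
-- re-running the traversal, which a precondition may not do (B returns the same value there).
def Pre_dfs (vis : List (Option Bool)) (edge : List (List Int)) : Prop :=
  vis ≠ [] ∧ (vis[0]? = some none →
    edge.length = vis.length ∧
      ∀ row ∈ edge, ∀ i ∈ row, -(vis.length : Int) ≤ i ∧ i < (vis.length : Int))
instance (vis : List (Option Bool)) (edge : List (List Int)) : Decidable (Pre_dfs vis edge) := by
  unfold Pre_dfs; infer_instance

def pvWitness_dfs : List (Option Bool) × List (List Int) :=
  ([none, none, some true], [[1, 2], [-1], []])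

def Spec_dfs (vis : List (Option Bool)) (edge : List (List Int)) (out : List (Option Bool)) : Prop := out = dfs_alt vis edge
instance (vis : List (Option Bool)) (edge : List (List Int)) (out : List (Option Bool)) : Decidable (Spec_dfs vis edge out) := by unfold Spec_dfs; infer_instance

-- ===== CLAIM (what is proved, stated in full; the proofs are below) =====
def Claim_equal_dfs : Prop := ∀ (vis : List (Option Bool)) (edge : List (List Int)), Dom_dfs vis edge → Pre_dfs vis edge → Spec_dfs vis edge (dfs vis edge)

-- ===== LEMMAS AND PROOFS =====

theorem pv_inRange_get (s : List (Option Bool)) (u : Int)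
    (h : PySem.Raise.InRange s.length u) : ∃ x, PySem.List.pyGet? s u = some x := by
  cases hg : PySem.List.pyGet? s u with
  | none => exact absurd ((PySem.List.pyGet?_eq_none_iff s u).mp hg) (not_not_intro h)
  | some x => exact ⟨x, rfl⟩

theorem pv_inRange_get_row (edge : List (List Int)) (u : Int)
    (h : PySem.Raise.InRange edge.length u) : ∃ row, PySem.List.pyGet? edge u = some row := by
  cases hg : PySem.List.pyGet? edge u with
  | none => exact absurd ((PySem.List.pyGet?_eq_none_iff edge u).mp hg) (not_not_intro h)
  | some row => exact ⟨row, rfl⟩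

theorem pv_length_pySetD (s : List (Option Bool)) (u : Int) (v : Option Bool) :
    (PySem.List.pySetD s u v).length = s.length := by
  unfold PySem.List.pySetD PySem.List.pySet?
  cases PySem.List.pyIdx? s.length u <;> simp

-- the foldl of lvlStep preserves the length of vis, keeps every pending index in range,
-- and never increases the number of unvisited cells
theorem pv_foldl_inv (edge : List (List Int)) (n : Nat) (hn : edge.length = n)
    (hrows : ∀ row ∈ edge, ∀ i ∈ row, PySem.Raise.InRange n i) :
    ∀ (f : List Int) (p : List (Option Bool) × List Int),
      p.1.length = n → (∀ i ∈ p.2, PySem.Raise.InRange n i) →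
      (f.foldl (lvlStep edge) p).1.length = n ∧
        ∀ i ∈ (f.foldl (lvlStep edge) p).2, PySem.Raise.InRange n i := by
  intro f
  induction f with
  | nil => intro p h1 h2; exact ⟨h1, h2⟩
  | cons u f ih =>
    intro p h1 h2
    simp only [List.foldl_cons]
    apply ih
    · unfold lvlStep
      cases PySem.List.pyGet? p.1 u with
      | none => exact h1
      | some x =>
        cases x with
        | none =>
          cases PySem.List.pyGet? edge u with
          | none => exact h1
          | some row => simpa [pv_length_pySetD] using h1
        | some b => exact h1
    · unfold lvlStep
      cases PySem.List.pyGet? p.1 u with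
      | none => exact h2
      | some x =>
        cases x with
        | none =>
          cases hrow : PySem.List.pyGet? edge u with
          | none => exact h2
          | some row =>
            intro i hi
            simp only [List.mem_append] at hi
            rcases hi with hi | hi
            · exact h2 i hi
            · exact hrows row (PySem.List.mem_of_pyGet?_eq_some edge hrow) i hi
        | some b => exact h2

-- bridging lemma: A's queue state (frontier-suffix ++ accumulated-next) tracks B's round
theorem pv_bridge (edge : List (List Int)) (n : Nat) (hn : edge.length = n)
    (hrows : ∀ row ∈ edge, ∀ i ∈ row, PySem.Raise.InRange n i) :
    ∀ (f : List Int) (vis : List (Option Bool)) (acc : List Int),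
      vis.length = n → (∀ i ∈ f, PySem.Raise.InRange n i) →
      (∀ i ∈ acc, PySem.Raise.InRange n i) →
      bfsLoop edge vis (f ++ acc) =
        bfsLoop edge (f.foldl (lvlStep edge) (vis, acc)).1 (f.foldl (lvlStep edge) (vis, acc)).2 := by
  intro f
  induction f with
  | nil => intro vis acc _ _ _; simp
  | cons u f ih =>
    intro vis acc hlen hf hacc
    have hu : PySem.Raise.InRange vis.length u := by rw [hlen]; exact hf u (by simp)
    obtain ⟨x, hx⟩ := pv_inRange_get vis u hu
    have hf' : ∀ i ∈ f, PySem.Raise.InRange n i := fun i hi => hf i (by simp [hi])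
    cases x with
    | some b =>
      have hL : bfsLoop edge vis ((u :: f) ++ acc) = bfsLoop edge vis (f ++ acc) := by
        rw [bfsLoop.eq_def]
        simp only [List.cons_append]
        rw [hx]
      have hR : lvlStep edge (vis, acc) u = (vis, acc) := by
        unfold lvlStep; rw [hx]
      rw [hL, List.foldl_cons, hR]
      exact ih vis acc hlen hf' hacc
    | none =>
      have hue : PySem.Raise.InRange edge.length u := by rw [hn]; rw [hlen] at hu; exact hu
      obtain ⟨row, hrow⟩ := pv_inRange_get_row edge u hue
      have hL : bfsLoop edge vis ((u :: f) ++ acc) =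
          bfsLoop edge (PySem.List.pySetD vis u (some true)) ((f ++ acc) ++ row) := by
        rw [bfsLoop.eq_def]
        simp only [List.cons_append]
        rw [hx, hrow]
      have hR : lvlStep edge (vis, acc) u = (PySem.List.pySetD vis u (some true), acc ++ row) := by
        unfold lvlStep; rw [hx, hrow]
      have hassoc : (f ++ acc) ++ row = f ++ (acc ++ row) := List.append_assoc f acc row
      rw [hL, hassoc, List.foldl_cons, hR]
      apply ih
      · rw [pv_length_pySetD]; exact hlen
      · exact hf'
      · intro i hi
        rcases List.mem_append.mp hi with hi | hi
        · exact hacc i hi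
        · exact hrows row (PySem.List.mem_of_pyGet?_eq_some edge hrow) i hi

-- main lemma: the level loop computes what the queue loop computes
theorem pv_lvl_eq_bfs (edge : List (List Int)) (n : Nat) (hn : edge.length = n)
    (hrows : ∀ row ∈ edge, ∀ i ∈ row, PySem.Raise.InRange n i) :
    ∀ (c : Nat) (vis : List (Option Bool)) (f : List Int),
      vis.count none ≤ c → vis.length = n → (∀ i ∈ f, PySem.Raise.InRange n i) →
      lvlLoop edge vis f = bfsLoop edge vis f := by
  intro c
  induction c with
  | zero =>
    intro vis f hc hlen hf
    cases f with
    | nil => rw [lvlLoop.eq_def, bfsLoop.eq_def]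
    | cons u f' =>
      have hL : lvlLoop edge vis (u :: f') =
          lvlLoop edge (lvlRound edge vis (u :: f')).1 (lvlRound edge vis (u :: f')).2 := by
        rw [lvlLoop.eq_def]
      have hb := pv_bridge edge n hn hrows (u :: f') vis [] hlen hf (by simp)
      simp only [List.append_nil] at hb
      rcases pv_lvlStep_progress edge (u :: f') (vis, ([] : List Int)) with h | h
      · have h2 : List.count none ((u :: f').foldl (lvlStep edge) (vis, ([] : List Int))).1
            < List.count none vis := h
        omega
      · have hBf : bfsLoop edge vis (u :: f') = vis := by
          rw [hb, h]
          rw [bfsLoop.eq_def]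
        have hLf : lvlLoop edge (lvlRound edge vis (u :: f')).1 (lvlRound edge vis (u :: f')).2
            = vis := by
          rw [lvlRound, h]
          rw [lvlLoop.eq_def]
        rw [hL, hLf, hBf]
  | succ c ih =>
    intro vis f hc hlen hf
    cases f with
    | nil => rw [lvlLoop.eq_def, bfsLoop.eq_def]
    | cons u f' =>
      have hL : lvlLoop edge vis (u :: f') =
          lvlLoop edge (lvlRound edge vis (u :: f')).1 (lvlRound edge vis (u :: f')).2 := by
        rw [lvlLoop.eq_def]
      have hb := pv_bridge edge n hn hrows (u :: f') vis [] hlen hf (by simp)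
      simp only [List.append_nil] at hb
      have hinv := pv_foldl_inv edge n hn hrows (u :: f') (vis, []) hlen (by simp)
      rcases pv_lvlStep_progress edge (u :: f') (vis, ([] : List Int)) with h | h
      · rw [hL, hb]
        have h2 : List.count none ((u :: f').foldl (lvlStep edge) (vis, ([] : List Int))).1
            < List.count none vis := h
        exact ih _ _ (by rw [lvlRound]; omega)
          (by rw [lvlRound]; exact hinv.1)
          (by rw [lvlRound]; exact hinv.2)
      · have hBf : bfsLoop edge vis (u :: f') = vis := by
          rw [hb, h]
          rw [bfsLoop.eq_def]
        have hLf : lvlLoop edge (lvlRound edge vis (u :: f')).1 (lvlRound edge vis (u :: f')).2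
            = vis := by
          rw [lvlRound, h]
          rw [lvlLoop.eq_def]
        rw [hL, hLf, hBf]

-- ===== VERDICT (by name: the statement is the Claim_ definition above) =====
theorem dfs_spec : Claim_equal_dfs := by
  intro vis edge _ hpre
  unfold Spec_dfs dfs dfs_alt
  obtain ⟨hne, hwf⟩ := hpre
  have hlen : 0 < vis.length := List.length_pos_of_ne_nil hne
  obtain ⟨x, hx0⟩ : ∃ x, vis[0]? = some x := ⟨vis[0], List.getElem?_eq_getElem hlen⟩
  have hget0 : PySem.List.pyGet? vis 0 = some x := by
    rw [PySem.List.pyGet?_zero]; exact hx0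
  cases x with
  | none =>
    obtain ⟨hlens, hrows⟩ := hwf hx0
    exact (pv_lvl_eq_bfs edge vis.length hlens hrows (vis.count none) vis [0] le_rfl rfl
      (by intro i hi; simp at hi; subst hi; constructor <;> omega)).symm
  | some b =>
    have hA : bfsLoop edge vis [0] = vis := by
      rw [bfsLoop.eq_def]
      simp only []
      rw [hget0]
      rw [bfsLoop.eq_def]
    have hstep : lvlStep edge (vis, ([] : List Int)) 0 = (vis, []) := by
      simp only [lvlStep, hget0]
    have hB : lvlLoop edge vis [0] = vis := by
      rw [lvlLoop.eq_def]
      simp only [lvlRound, List.foldl_cons, List.foldl_nil, hstep]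
      rw [lvlLoop.eq_def]
    rw [hA, hB]
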